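-- pv_equiv track=rewrite | github.com/Min-code0202/Algorithm_solution | 백준/그리디/2828.py | find_baguni
-- ===== SOURCE A (Python) =====
-- def find_baguni(dic):
--     left = None
--     right = None
--     for index, value in dic.items():
--         if value == 1:
--             if left is None:
--                 left = index
--             right = index
--     return left, right
-- ===== SOURCE B (Python) =====
-- def find_baguni(dic):
--     items = list(dic.items())
--     left = next((k for k, v in items if v == 1), None)
--     right = next((k for k, v in reversed(items) if v == 1), None)
--     return left, right
-- ===== Notes on version B (the rewrite author's own statement) =====
-- stated objective: alternative
-- what changed: Replaces A's single full pass maintaining two sentinels with two independent short-circuit first-match searches, one forward for the leftmost hit and one over the reversed items for the rightmost hit, each stopping at its first match.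
import Mathlib
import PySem

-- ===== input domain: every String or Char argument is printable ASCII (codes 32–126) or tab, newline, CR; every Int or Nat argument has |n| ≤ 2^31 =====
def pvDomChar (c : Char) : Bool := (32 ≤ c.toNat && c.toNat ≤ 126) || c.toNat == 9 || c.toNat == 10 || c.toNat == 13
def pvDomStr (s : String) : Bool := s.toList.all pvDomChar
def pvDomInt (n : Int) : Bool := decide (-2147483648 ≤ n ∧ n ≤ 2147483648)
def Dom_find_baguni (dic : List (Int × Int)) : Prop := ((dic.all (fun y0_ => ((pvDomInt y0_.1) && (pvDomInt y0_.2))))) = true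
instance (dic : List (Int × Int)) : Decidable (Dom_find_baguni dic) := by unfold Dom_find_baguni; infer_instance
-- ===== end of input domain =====

-- B replaces A's single two-sentinel tracking pass with two independent short-circuit
-- first-match searches, one forward and one over the reversed items (objective: alternative).

-- ===== PORT A =====
-- literal port of A's loop: state (left, right), updated per item
def find_baguni (dic : List (Int × Int)) : Option Int × Option Int :=
  dic.foldl (fun (s : Option Int × Option Int) (p : Int × Int) =>
    if p.2 = 1 then
      ((match s.1 with | none => some p.1 | some l => some l), some p.1)
    else s) (none, none)

-- ===== PORT B =====
-- first key whose value is 1, short-circuit (port of next((k for k,v in … if v == 1), None))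
def firstHit (l : List (Int × Int)) : Option Int :=
  match l with
  | [] => none
  | p :: t => if p.2 = 1 then some p.1 else firstHit t

def find_baguni_alt (dic : List (Int × Int)) : Option Int × Option Int :=
  (firstHit dic, firstHit dic.reverse)

-- ===== PRECONDITION & SPEC =====
def Spec_find_baguni (dic : List (Int × Int)) (out : Option Int × Option Int) : Prop := out = find_baguni_alt dic
instance (dic : List (Int × Int)) (out : Option Int × Option Int) : Decidable (Spec_find_baguni dic out) := by unfold Spec_find_baguni; infer_instance

-- ===== CLAIM (what is proved, stated in full; the proofs are below) =====
def Claim_equal_find_baguni : Prop := ∀ (dic : List (Int × Int)), Dom_find_baguni dic → Spec_find_baguni dic (find_baguni dic)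

-- ===== LEMMAS AND PROOFS =====

theorem firstHit_append (a b : List (Int × Int)) :
    firstHit (a ++ b) = (firstHit a).or (firstHit b) := by
  induction a with
  | nil => simp [firstHit]
  | cons p t ih =>
    by_cases h : p.2 = 1 <;> simp [firstHit, h, ih]

theorem foldl_some (dic : List (Int × Int)) (l : Int) (r : Option Int) :
    dic.foldl (fun (s : Option Int × Option Int) (p : Int × Int) =>
      if p.2 = 1 then
        ((match s.1 with | none => some p.1 | some l => some l), some p.1)
      else s) (some l, r)
    = (some l, (firstHit dic.reverse).or r) := by
  induction dic generalizing r with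
  | nil => simp [firstHit]
  | cons p t ih =>
    by_cases h : p.2 = 1
    · rw [List.foldl_cons, if_pos h, ih]
      simp [firstHit_append, firstHit, h]
    · rw [List.foldl_cons, if_neg h, ih]
      simp [firstHit_append, firstHit, h]

theorem find_eq_alt (dic : List (Int × Int)) : find_baguni dic = find_baguni_alt dic := by
  unfold find_baguni find_baguni_alt
  induction dic with
  | nil => rfl
  | cons p t ih =>
    by_cases h : p.2 = 1
    · rw [List.foldl_cons, if_pos h, foldl_some]
      simp [firstHit_append, firstHit, h]
    · rw [List.foldl_cons, if_neg h, ih]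
      simp [firstHit_append, firstHit, h]

-- ===== VERDICT (by name: the statement is the Claim_ definition above) =====
theorem find_baguni_spec : Claim_equal_find_baguni := by
  intro dic _
  unfold Spec_find_baguni
  exact find_eq_alt dic
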